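-- pv_equiv track=rewrite | github.com/edaaydinea/HackerRank | Skills Certification Test/Problem Solving (Intermediate)/Bitwise AND.PY | countPairs
-- ===== SOURCE A (Python) =====
-- from collections import defaultdict
--
-- def countPairs(arr):
--     power_of_2 = lambda x: x > 0 and not (x & (x - 1))
--     default_dict = defaultdict(int)
--     for x in arr:
--         default_dict[x] += 1
--     default_dict = list(default_dict.items())
--     answer = 0
--     for i in range(len(default_dict)):
--         a, a_count = default_dict[i]
--         for j in range(i, len(default_dict)):
--             b, b_count = default_dict[j]
--             if power_of_2(a & b):
--                 if a == b:
--                     answer += (a_count * (a_count - 1)) // 2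
--                 else:
--                     answer += a_count * b_count
--     return answer
-- ===== SOURCE B (Python) =====
-- def countPairs(arr):
--     is_power_of_2 = lambda x: x > 0 and not (x & (x - 1))
--     answer = 0
--     rest = list(arr)
--     while rest:
--         x = rest.pop(0)
--         for y in rest:
--             if is_power_of_2(x & y):
--                 answer += 1
--     return answer
-- ===== Notes on version B (the rewrite author's own statement) =====
-- stated objective: simpler
-- what changed: Drops the frequency dictionary and the multiplicity combinatorics entirely: B walks the list once per element, pairing each element with every later element and counting directly whether their bitwise AND is a power of two.
import Mathlib
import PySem

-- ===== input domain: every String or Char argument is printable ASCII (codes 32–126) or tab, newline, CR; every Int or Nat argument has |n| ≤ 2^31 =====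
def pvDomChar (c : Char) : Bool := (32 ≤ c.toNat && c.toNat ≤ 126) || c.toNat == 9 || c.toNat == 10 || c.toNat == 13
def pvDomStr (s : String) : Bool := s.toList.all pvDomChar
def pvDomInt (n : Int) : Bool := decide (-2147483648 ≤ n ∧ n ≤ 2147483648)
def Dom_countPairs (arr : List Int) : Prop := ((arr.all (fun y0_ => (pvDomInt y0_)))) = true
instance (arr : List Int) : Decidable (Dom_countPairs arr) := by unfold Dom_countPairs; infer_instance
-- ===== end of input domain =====

-- B drops A's frequency dictionary and multiplicity combinatorics and simply counts, for each
-- element, the later elements whose bitwise AND with it is a power of two (simpler; not faster).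

-- ===== PORT A =====
-- power_of_2 = lambda x: x > 0 and not (x & (x - 1))   (identical lambda in both Pythons)
def pvPow2 (x : Int) : Bool := decide (0 < x) && decide (PySem.Int.band x (x - 1) = 0)

def countPairs (arr : List Int) : Int :=
  -- default_dict = defaultdict(int); for x in arr: default_dict[x] += 1
  let dd := arr.foldl (fun d x => d.modify x 0 (· + 1)) (PySem.Dict.empty : PySem.Dict Int Int)
  -- default_dict = list(default_dict.items())
  let items := dd.items
  let n : Int := items.length
  (PySem.List.pyRange 0 n 1).foldl (fun answer i =>
    let p := PySem.List.pyGetD items i (0, 0)   -- a, a_count = default_dict[i]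
    (PySem.List.pyRange i n 1).foldl (fun answer2 j =>
      let q := PySem.List.pyGetD items j (0, 0) -- b, b_count = default_dict[j]
      if pvPow2 (PySem.Int.band p.1 q.1) then
        if p.1 == q.1 then answer2 + PySem.Int.floordiv (p.2 * (p.2 - 1)) 2
        else answer2 + p.2 * q.2
      else answer2) answer) 0

-- ===== PORT B =====
-- while rest: x = rest.pop(0); for y in rest: if is_power_of_2(x & y): answer += 1
def pvAltLoop : List Int → Int → Int
  | [], answer => answer
  | x :: rest, answer =>
      pvAltLoop rest
        (rest.foldl (fun a y => if pvPow2 (PySem.Int.band x y) then a + 1 else a) answer)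

def countPairs_alt (arr : List Int) : Int := pvAltLoop arr 0

-- ===== PRECONDITION & SPEC =====
def Spec_countPairs (arr : List Int) (out : Int) : Prop := out = countPairs_alt arr
instance (arr : List Int) (out : Int) : Decidable (Spec_countPairs arr out) := by unfold Spec_countPairs; infer_instance

-- ===== CLAIM (what is proved, stated in full; the proofs are below) =====
def Claim_equal_countPairs : Prop := ∀ (arr : List Int), Dom_countPairs arr → Spec_countPairs arr (countPairs arr)

-- ===== LEMMAS AND PROOFS =====

-- contribution of the ordered key pair (p, q) of A's items list
def pvContrib (p q : Int × Int) : Int :=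
  if pvPow2 (PySem.Int.band p.1 q.1) then
    (if p.1 == q.1 then PySem.Int.floordiv (p.2 * (p.2 - 1)) 2 else p.2 * q.2)
  else 0

-- A's nested loop as structural recursion over the items list (each head paired with itself and all later entries)
def pvAsum : List (Int × Int) → Int
  | [] => 0
  | p :: t => ((p :: t).map (pvContrib p)).sum + pvAsum t

-- B's pair count as structural recursion
def pvBsum : List Int → Int
  | [] => 0
  | x :: t => ((t.countP (fun y => pvPow2 (PySem.Int.band x y))) : Int) + pvBsum t

-- A's items list: distinct values with their multiplicities
def pvWC (arr : List Int) : List (Int × Int) :=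
  (PySem.Set.ofList arr).map (fun k => (k, (arr.count k : Int)))

theorem pvAltLoop_eq (arr : List Int) (init : Int) : pvAltLoop arr init = init + pvBsum arr := by
  induction arr generalizing init with
  | nil => simp [pvAltLoop, pvBsum]
  | cons x t ih =>
    rw [pvAltLoop, ih, PySem.List.foldl_if_add_one, pvBsum]
    ring

theorem pvRangeSum_eq (L : List (Int × Int)) :
    ((List.range L.length).map
      (fun k => ((L.drop k).map (pvContrib (L.getD k (0, 0)))).sum)).sum = pvAsum L := by
  induction L with
  | nil => simp [pvAsum]
  | cons p t ih =>
    rw [List.length_cons, List.range_succ_eq_map, pvAsum]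
    simp only [List.map_cons, List.map_map, List.sum_cons, List.drop_zero, List.getD_cons_zero]
    congr 1


def pvLoopForm (L : List (Int × Int)) : Int :=
  (PySem.List.pyRange 0 (L.length : Int) 1).foldl (fun answer i =>
    (PySem.List.pyRange i (L.length : Int) 1).foldl (fun answer2 j =>
      if pvPow2 (PySem.Int.band (PySem.List.pyGetD L i (0, 0)).1 (PySem.List.pyGetD L j (0, 0)).1) then
        if (PySem.List.pyGetD L i (0, 0)).1 == (PySem.List.pyGetD L j (0, 0)).1 then
          answer2 + PySem.Int.floordiv ((PySem.List.pyGetD L i (0, 0)).2 * ((PySem.List.pyGetD L i (0, 0)).2 - 1)) 2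
        else answer2 + (PySem.List.pyGetD L i (0, 0)).2 * (PySem.List.pyGetD L j (0, 0)).2
      else answer2) answer) 0

theorem pvLoop_eq (L : List (Int × Int)) : pvLoopForm L = pvAsum L := by
  have hinner : ∀ (acc : Int), ∀ i ∈ PySem.List.pyRange 0 (L.length : Int) 1,
      (fun answer i =>
        (PySem.List.pyRange i (L.length : Int) 1).foldl (fun answer2 j =>
          if pvPow2 (PySem.Int.band (PySem.List.pyGetD L i (0, 0)).1 (PySem.List.pyGetD L j (0, 0)).1) then
            if (PySem.List.pyGetD L i (0, 0)).1 == (PySem.List.pyGetD L j (0, 0)).1 then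
              answer2 + PySem.Int.floordiv ((PySem.List.pyGetD L i (0, 0)).2 * ((PySem.List.pyGetD L i (0, 0)).2 - 1)) 2
            else answer2 + (PySem.List.pyGetD L i (0, 0)).2 * (PySem.List.pyGetD L j (0, 0)).2
          else answer2) answer) acc i
      = acc + ((L.drop i.toNat).map (pvContrib (PySem.List.pyGetD L i (0, 0)))).sum := by
    intro acc i hi
    have h0 : 0 ≤ i := (PySem.List.mem_pyRange_one.mp hi).1
    simp only
    rw [PySem.List.foldl_pyRange_pyGetD' L (0, 0) (fun answer2 q =>
          if pvPow2 (PySem.Int.band (PySem.List.pyGetD L i (0, 0)).1 q.1) then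
            if (PySem.List.pyGetD L i (0, 0)).1 == q.1 then
              answer2 + PySem.Int.floordiv ((PySem.List.pyGetD L i (0, 0)).2 * ((PySem.List.pyGetD L i (0, 0)).2 - 1)) 2
            else answer2 + (PySem.List.pyGetD L i (0, 0)).2 * q.2
          else answer2) acc h0]
    have hb : ∀ (a : Int), ∀ q ∈ L.drop i.toNat,
        (fun (a : Int) (q : Int × Int) =>
          if pvPow2 (PySem.Int.band (PySem.List.pyGetD L i (0, 0)).1 q.1) then
            if (PySem.List.pyGetD L i (0, 0)).1 == q.1 then
              a + PySem.Int.floordiv ((PySem.List.pyGetD L i (0, 0)).2 * ((PySem.List.pyGetD L i (0, 0)).2 - 1)) 2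
            else a + (PySem.List.pyGetD L i (0, 0)).2 * q.2
          else a) a q
        = a + pvContrib (PySem.List.pyGetD L i (0, 0)) q := by
      intro a q _
      simp only [pvContrib]
      split_ifs <;> simp
    rw [PySem.List.foldl_congr_mem (L.drop i.toNat) _
          (fun a q => a + pvContrib (PySem.List.pyGetD L i (0, 0)) q) acc hb,
        PySem.List.foldl_add]
  rw [pvLoopForm,
      PySem.List.foldl_congr_mem (PySem.List.pyRange 0 (L.length : Int) 1) _
        (fun acc i => acc + ((L.drop i.toNat).map (pvContrib (PySem.List.pyGetD L i (0, 0)))).sum) 0 hinner,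
      PySem.List.foldl_add]
  rw [← pvRangeSum_eq L, PySem.List.pyRange_one]
  simp only [List.map_map, Int.sub_zero, Int.toNat_natCast]
  rw [Int.zero_add]
  apply congrArg
  apply List.map_congr_left
  intro k hk
  simp only [Function.comp_apply, Int.zero_add, Int.toNat_natCast, PySem.List.pyGetD_natCast]

theorem countPairs_eq_pvAsum (arr : List Int) : countPairs arr = pvAsum (pvWC arr) := by
  have hitems : (arr.foldl (fun d x => d.modify x 0 (· + 1)) (PySem.Dict.empty : PySem.Dict Int Int)).items = pvWC arr := by
    rw [← PySem.Dict.counter_eq_foldl, PySem.Dict.items_counter, pvWC]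
  rw [show countPairs arr
      = pvLoopForm ((arr.foldl (fun d x => d.modify x 0 (· + 1)) (PySem.Dict.empty : PySem.Dict Int Int)).items) from rfl,
    hitems, pvLoop_eq]

def pvBump (x : Int) (p : Int × Int) : Int × Int := if p.1 = x then (p.1, p.2 + 1) else p

theorem pvBsum_append (arr : List Int) (x : Int) :
    pvBsum (arr ++ [x]) = pvBsum arr + (arr.countP (fun y => pvPow2 (PySem.Int.band y x)) : Int) := by
  induction arr with
  | nil => simp [pvBsum]
  | cons z t ih =>
    rw [List.cons_append, pvBsum, ih, pvBsum, List.countP_append, List.countP_cons]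
    simp only [List.countP_nil]
    push_cast
    ring_nf
    by_cases h : pvPow2 (PySem.Int.band z x) = true
    · simp [h]; ring
    · simp [h]

-- sum of a constant selected at the unique position whose key is x
theorem pvSum_single {α β : Type} [DecidableEq β] (t : List α) (key : α → β) (x : β) (C : Int)
    (hnd : (t.map key).Nodup) (hx : x ∈ t.map key) :
    (t.map (fun q => if key q = x then C else 0)).sum = C := by
  induction t with
  | nil => simp at hx
  | cons p t ih =>
    simp only [List.map_cons, List.nodup_cons] at hnd
    simp only [List.map_cons, List.sum_cons]
    rcases List.mem_cons.mp hx with h | h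
    · rw [if_pos h.symm]
      have hz : ∀ q ∈ t, (if key q = x then C else 0) = 0 := by
        intro q hq
        rw [if_neg]
        intro he
        exact hnd.1 (h ▸ he ▸ List.mem_map_of_mem hq)
      rw [List.map_congr_left hz]
      simp
    · rw [ih hnd.2 h, if_neg (by rintro rfl; exact hnd.1 h), zero_add]

theorem pvCountSum (arr : List Int) (f : Int → Int) :
    ((PySem.Set.ofList arr).map (fun k => (arr.count k : Int) * f k)).sum = (arr.map f).sum := by
  induction arr using List.reverseRecOn with
  | nil => simp
  | append_singleton arr z ih =>
    rw [PySem.Set.ofList_append_singleton]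
    by_cases hz : z ∈ PySem.Set.ofList arr
    · rw [PySem.Set.add_of_mem hz]
      have hz' : z ∈ arr := (PySem.Set.mem_ofList _ _).mp hz
      have hcong : ∀ k ∈ PySem.Set.ofList arr,
          ((arr ++ [z]).count k : Int) * f k
            = (arr.count k : Int) * f k + (if k = z then f z else 0) := by
        intro k _
        rw [List.count_append]
        by_cases h : k = z
        · subst h; simp; ring
        · simp [Ne.symm h, h]
      have hs := pvSum_single (PySem.Set.ofList arr) (fun k => k) z (f z)
        (by simp [PySem.Set.nodup_ofList arr]) (by simpa using hz)
      simp only [] at hs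
      rw [List.map_congr_left hcong, PySem.List.sum_map_add_int, ih, hs]
      simp [List.map_append]
    · rw [PySem.Set.add_of_not_mem hz]
      have hz' : z ∉ arr := fun h => hz ((PySem.Set.mem_ofList _ _).mpr h)
      have hcong : ∀ k ∈ PySem.Set.ofList arr,
          ((arr ++ [z]).count k : Int) * f k = (arr.count k : Int) * f k := by
        intro k hk
        have hne : k ≠ z := by rintro rfl; exact hz hk
        rw [List.count_append, List.count_singleton]
        simp [Ne.symm hne]
      rw [List.map_append, List.sum_append, List.map_congr_left hcong, ih]
      simp [List.count_append, List.count_singleton, List.count_eq_zero_of_not_mem hz']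

theorem pvAsum_append (L : List (Int × Int)) (p : Int × Int) :
    pvAsum (L ++ [p]) = pvAsum L + (L.map (fun q => pvContrib q p)).sum + pvContrib p p := by
  induction L with
  | nil => simp [pvAsum]
  | cons r t ih =>
    rw [List.cons_append, pvAsum, ih, pvAsum]
    simp only [List.map_cons, List.sum_cons, List.map_append, List.sum_append,
      List.map_nil, List.sum_nil]
    ring

theorem pvFd_step (a : Int) :
    PySem.Int.floordiv ((a + 1) * a) 2 = PySem.Int.floordiv (a * (a - 1)) 2 + a := by
  rw [PySem.Int.floordiv_eq_ediv_of_pos (by norm_num), PySem.Int.floordiv_eq_ediv_of_pos (by norm_num),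
      show (a + 1) * a = a * (a - 1) + a * 2 by ring, Int.add_mul_ediv_right _ _ (by norm_num)]

theorem pvBump_delta (L : List (Int × Int)) (x : Int)
    (hnd : (L.map Prod.fst).Nodup) (hx : x ∈ L.map Prod.fst) :
    pvAsum (L.map (pvBump x)) = pvAsum L
      + (L.map (fun q => if pvPow2 (PySem.Int.band x q.1) then q.2 else 0)).sum := by
  induction L with
  | nil => simp at hx
  | cons p t ih =>
    simp only [List.map_cons, List.nodup_cons] at hnd
    simp only [List.map_cons, List.sum_cons, pvAsum]
    by_cases hk : p.1 = x
    · -- the head entry is the bumped one; x does not occur in the tail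
      have hxt : ∀ q ∈ t, pvBump x q = q := by
        intro q hq
        rw [pvBump, if_neg]
        intro he
        exact hnd.1 (hk ▸ he ▸ List.mem_map_of_mem hq)
      rw [List.map_congr_left hxt, List.map_id']
      have hhead : pvBump x p = (p.1, p.2 + 1) := by rw [pvBump, if_pos hk]
      rw [hhead]
      have hdiag : pvContrib (p.1, p.2 + 1) (p.1, p.2 + 1)
          = pvContrib p p + (if pvPow2 (PySem.Int.band x p.1) then p.2 else 0) := by
        simp only [pvContrib, ← hk, beq_self_eq_true, if_true, PySem.Int.band_self]
        by_cases hp : pvPow2 p.1 = true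
        · rw [if_pos hp, if_pos hp, if_pos hp, show p.2 + 1 - 1 = p.2 by ring, pvFd_step]
        · simp [hp]
      have hcross : ∀ q ∈ t, pvContrib (p.1, p.2 + 1) q
          = pvContrib p q + (if pvPow2 (PySem.Int.band x q.1) then q.2 else 0) := by
        intro q hq
        have hne : p.1 ≠ q.1 := fun he => hnd.1 (he ▸ List.mem_map_of_mem hq)
        simp only [pvContrib, ← hk, beq_iff_eq, if_neg hne]
        split_ifs <;> ring
      rw [List.map_congr_left hcross, PySem.List.sum_map_add_int, hdiag]
      ring
    · -- the bumped entry lies in the tail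
      have hxt : x ∈ t.map Prod.fst := by
        rcases List.mem_cons.mp hx with h | h
        · exact absurd h.symm hk
        · exact h
      have hhead : pvBump x p = p := by rw [pvBump, if_neg hk]
      rw [hhead, ih hnd.2 hxt]
      simp only [List.map_map]
      have hcross : ∀ q ∈ t, (pvContrib p ∘ pvBump x) q
          = pvContrib p q + (if q.1 = x then (if pvPow2 (PySem.Int.band p.1 x) then p.2 else 0) else 0) := by
        intro q hq
        by_cases hqx : q.1 = x
        · have hne : p.1 ≠ q.1 := fun he => hk (he.trans hqx)
          simp only [Function.comp_apply, pvBump, if_pos hqx, pvContrib, beq_iff_eq, if_neg hne]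
          simp only [← hqx]
          split_ifs <;> ring
        · simp [pvBump, if_neg hqx]
      rw [List.map_congr_left hcross, PySem.List.sum_map_add_int,
          pvSum_single t Prod.fst x _ hnd.2 hxt]
      have hdd : pvContrib p (pvBump x p) = pvContrib p p := by rw [hhead]
      rw [PySem.Int.band_comm p.1 x]
      ring

theorem pvMain (arr : List Int) : pvAsum (pvWC arr) = pvBsum arr := by
  induction arr using List.reverseRecOn with
  | nil => simp [pvWC, pvAsum, pvBsum, PySem.Set.ofList]
  | append_singleton arr z ih =>
    rw [pvBsum_append, ← ih]
    by_cases hz : z ∈ arr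
    · have hofl : PySem.Set.ofList (arr ++ [z]) = PySem.Set.ofList arr := by
        rw [PySem.Set.ofList_append_singleton, PySem.Set.add_of_mem ((PySem.Set.mem_ofList _ _).mpr hz)]
      have hwc : pvWC (arr ++ [z]) = (pvWC arr).map (pvBump z) := by
        rw [pvWC, hofl, pvWC, List.map_map]
        apply List.map_congr_left
        intro k _
        by_cases h : k = z
        · subst h
          simp only [Function.comp_apply, pvBump, List.count_append,
            List.count_singleton, BEq.rfl, if_true]
          push_cast; ring_nf
        · simp [Function.comp, pvBump, h, List.count_append, Ne.symm h]
      have hkeys : (pvWC arr).map Prod.fst = PySem.Set.ofList arr := by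
        rw [pvWC, List.map_map]; simp [Function.comp_def]
      rw [hwc, pvBump_delta _ z (by rw [hkeys]; exact PySem.Set.nodup_ofList arr)
            (by rw [hkeys]; exact (PySem.Set.mem_ofList _ _).mpr hz)]
      congr 1
      rw [pvWC, List.map_map]
      have hcomp : ((fun q : Int × Int => if pvPow2 (PySem.Int.band z q.1) then q.2 else 0)
            ∘ fun k => (k, (arr.count k : Int)))
          = fun k => (arr.count k : Int) * (if pvPow2 (PySem.Int.band k z) then 1 else 0) := by
        funext k
        simp only [Function.comp_apply, PySem.Int.band_comm z k]
        split_ifs <;> ring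
      rw [hcomp, pvCountSum arr (fun k => if pvPow2 (PySem.Int.band k z) then 1 else 0)]
      exact PySem.List.sum_map_ite_one_zero _ _
    · have hwc : pvWC (arr ++ [z]) = pvWC arr ++ [(z, 1)] := by
        rw [pvWC, PySem.Set.ofList_append_singleton,
            PySem.Set.add_of_not_mem (fun h => hz ((PySem.Set.mem_ofList _ _).mp h)),
            List.map_append, pvWC]
        congr 1
        · apply List.map_congr_left
          intro k hk
          have hne : k ≠ z := by rintro rfl; exact hz ((PySem.Set.mem_ofList _ _).mp hk)
          rw [List.count_append, List.count_singleton]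
          simp [Ne.symm hne]
        · simp [List.count_append, List.count_singleton, List.count_eq_zero_of_not_mem hz]
      rw [hwc, pvAsum_append]
      have hdiag : pvContrib (z, 1) (z, 1) = 0 := by
        simp [pvContrib, PySem.Int.floordiv]
      rw [hdiag, add_zero]
      congr 1
      rw [pvWC]
      have hcong : ∀ k ∈ PySem.Set.ofList arr,
          ((fun q => pvContrib q (z, 1)) ∘ fun k => (k, (arr.count k : Int))) k
            = (arr.count k : Int) * (if pvPow2 (PySem.Int.band k z) then 1 else 0) := by
        intro k hk
        have hne : k ≠ z := by rintro rfl; exact hz ((PySem.Set.mem_ofList _ _).mp hk)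
        simp only [Function.comp_apply, pvContrib, beq_iff_eq, if_neg hne]
        split_ifs <;> ring
      rw [List.map_map, List.map_congr_left hcong,
          pvCountSum arr (fun k => if pvPow2 (PySem.Int.band k z) then 1 else 0)]
      exact PySem.List.sum_map_ite_one_zero _ _

-- ===== VERDICT (by name: the statement is the Claim_ definition above) =====
theorem countPairs_spec : Claim_equal_countPairs := by
  intro arr _
  show countPairs arr = countPairs_alt arr
  rw [countPairs_eq_pvAsum, pvMain, countPairs_alt, pvAltLoop_eq, zero_add]
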